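-- pv_equiv track=rewrite | github.com/zhaozongzhao/learngit | Basic_grammar/高阶函数/推倒式/homework_02day.py | r_list2
-- ===== SOURCE A (Python) =====
-- def r_list2(list2):
--     list1 = []
--     r_list1 = iter(list2)
--     for i in r_list1:
--        while True:
--         if i[1] >= 50:
--             list1.append(i)
--             break
--         try:
--             g = next(r_list1)
--             i = [g[0], g[1] + i[1]]
--         except StopIteration:
--             list1.append(i)
--             break
--     return list1
-- ===== SOURCE B (Python) =====
-- def r_list2(list2):
--     # pass 1: compute segment lengths (greedy until running value sum >= 50)
--     lens = []
--     s = 0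
--     k = 0
--     for row in list2:
--         s += row[1]
--         k += 1
--         if s >= 50:
--             lens.append(k)
--             s = 0
--             k = 0
--     if k:
--         lens.append(k)
--     # pass 2: split the list by those lengths and aggregate each segment
--     out = []
--     pos = list2
--     for n in lens:
--         seg, pos = pos[:n], pos[n:]
--         out.append(seg[0] if n == 1 else [seg[-1][0], sum(r[1] for r in seg)])
--     return out
-- ===== Notes on version B (the rewrite author's own statement) =====
-- stated objective: alternative
-- what changed: Replaced A's one-pass on-the-fly merging with a manual iterator, nested while-True and StopIteration handling by a two-stage algorithm: a first pass computes only the segment lengths from the running value sums, and a second pass splits the list by those lengths with slicing and aggregates each segment (pass-through for length-1 segments, [last[0], sum] otherwise).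
-- outside the precondition, e.g. on r_list2([[5]]): A raises IndexError, B raises IndexError
import Mathlib
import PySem

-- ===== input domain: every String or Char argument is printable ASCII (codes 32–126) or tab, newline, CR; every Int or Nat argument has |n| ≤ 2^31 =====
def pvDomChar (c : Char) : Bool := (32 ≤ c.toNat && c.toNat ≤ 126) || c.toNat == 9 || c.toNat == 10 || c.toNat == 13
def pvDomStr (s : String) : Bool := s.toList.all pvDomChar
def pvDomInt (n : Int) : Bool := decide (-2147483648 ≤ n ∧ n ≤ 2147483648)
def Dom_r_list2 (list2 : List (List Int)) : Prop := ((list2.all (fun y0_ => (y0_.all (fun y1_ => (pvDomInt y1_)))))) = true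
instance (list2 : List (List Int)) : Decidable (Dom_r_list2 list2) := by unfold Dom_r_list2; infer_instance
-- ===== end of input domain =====

-- B replaces A's one-pass on-the-fly merging (manual iterator, nested while-True, StopIteration)
-- by two staged passes: first compute segment lengths from running sums, then split the list by
-- those lengths and aggregate each segment; same return value on Pre_ (all rows of length ≥ 2).

-- ===== PORT A =====
-- l[1] / l[0]: exact where Pre_ holds (rows of length ≥ 2); Python raises IndexError outside Pre_.
def pvAt1 (l : List Int) : Int := (PySem.List.pyGet? l 1).getD 0
def pvAt0 (l : List Int) : Int := (PySem.List.pyGet? l 0).getD 0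

-- A's inner `while True` with the shared iterator: `rest` is what the iterator has not yielded yet;
-- a `break` returns to the outer `for`, which takes the next element of `rest` (inlined here).
def pvAInner (i : List Int) (rest : List (List Int)) (acc : List (List Int)) : List (List Int) :=
  if pvAt1 i ≥ 50 then
    -- list1.append(i); break; outer for takes next i from the iterator
    match rest with
    | [] => acc ++ [i]
    | j :: rest' => pvAInner j rest' (acc ++ [i])
  else
    -- g = next(r_list1); i = [g[0], g[1] + i[1]]  (StopIteration: append and stop)
    match rest with
    | [] => acc ++ [i]
    | g :: rest' => pvAInner [pvAt0 g, pvAt1 g + pvAt1 i] rest' acc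

def r_list2 (list2 : List (List Int)) : List (List Int) :=
  match list2 with
  | [] => []
  | i :: rest => pvAInner i rest []

-- ===== PORT B =====
-- B's first pass: `for row in list2: s += row[1]; k += 1; if s >= 50: lens.append(k); s = 0; k = 0`.
def pvLensGo (rows : List (List Int)) (s : Int) (k : Nat) (lens : List Nat) :
    List Nat × Int × Nat :=
  match rows with
  | [] => (lens, s, k)
  | row :: rest =>
    let s' := s + pvAt1 row
    let k' := k + 1
    if s' ≥ 50 then pvLensGo rest 0 0 (lens ++ [k']) else pvLensGo rest s' k' lens

-- `if k: lens.append(k)` after the loop.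
def pvFin (t : List Nat × Int × Nat) : List Nat :=
  if t.2.2 ≠ 0 then t.1 ++ [t.2.2] else t.1

-- `sum(r[1] for r in seg)`
def pvSum1 (seg : List (List Int)) : Int := seg.foldl (fun a r => a + pvAt1 r) 0

-- B's second pass: `for n in lens: seg, pos = pos[:n], pos[n:]; out.append(...)`.
def pvBuild (lens : List Nat) (pos : List (List Int)) : List (List Int) :=
  match lens with
  | [] => []
  | n :: ns =>
    let seg := pos.take n
    let rest := pos.drop n
    (if n == 1 then (PySem.List.pyGet? seg 0).getD []
     else [pvAt0 (seg.getLastD []), pvSum1 seg]) :: pvBuild ns rest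

def r_list2_alt (list2 : List (List Int)) : List (List Int) :=
  pvBuild (pvFin (pvLensGo list2 0 0 [])) list2

-- ===== PRECONDITION & SPEC =====
-- Pre_ excludes exactly the inputs where A raises IndexError: every row is indexed at [1] (and [0]),
-- so A returns iff every row has length ≥ 2 (B raises IndexError there as well).
def Pre_r_list2 (list2 : List (List Int)) : Prop := ∀ l ∈ list2, 2 ≤ l.length
instance (list2 : List (List Int)) : Decidable (Pre_r_list2 list2) := by unfold Pre_r_list2; infer_instance
def pvWitness_r_list2 : List (List Int) := [[1, 60], [2, 3], [4, 5]]

def Spec_r_list2 (list2 : List (List Int)) (out : List (List Int)) : Prop := out = r_list2_alt list2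
instance (list2 : List (List Int)) (out : List (List Int)) : Decidable (Spec_r_list2 list2 out) := by unfold Spec_r_list2; infer_instance

-- ===== CLAIM (what is proved, stated in full; the proofs are below) =====
def Claim_equal_r_list2 : Prop := ∀ (list2 : List (List Int)), Dom_r_list2 list2 → Pre_r_list2 list2 → Spec_r_list2 list2 (r_list2 list2)

-- ===== LEMMAS AND PROOFS =====

-- Accumulator-free form of A's loop.
def pvS (i : List Int) (rest : List (List Int)) : List (List Int) :=
  if pvAt1 i ≥ 50 then
    match rest with
    | [] => [i]
    | j :: rest' => i :: pvS j rest'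
  else
    match rest with
    | [] => [i]
    | g :: rest' => pvS [pvAt0 g, pvAt1 g + pvAt1 i] rest'

lemma pvAInner_eq_acc_pvS (rest : List (List Int)) :
    ∀ (i : List Int) (acc : List (List Int)), pvAInner i rest acc = acc ++ pvS i rest := by
  induction rest with
  | nil => intro i acc; by_cases h : pvAt1 i ≥ 50 <;> simp [pvAInner, pvS, h]
  | cons g rest' ih =>
      intro i acc
      by_cases h : pvAt1 i ≥ 50
      · rw [pvAInner, pvS]; simp only [h, if_pos, ih]; simp
      · rw [pvAInner, pvS]; simp only [h, if_false, ih]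

-- The element pvBuild produces for a whole segment `cur`.
def pvElem (cur : List (List Int)) : List Int :=
  if cur.length == 1 then (PySem.List.pyGet? cur 0).getD []
  else [pvAt0 (cur.getLastD []), pvSum1 cur]

lemma pvSum1_append (l : List (List Int)) (g : List Int) :
    pvSum1 (l ++ [g]) = pvSum1 l + pvAt1 g := by
  simp [pvSum1, List.foldl_append]

lemma pvAt1_pvElem (cur : List (List Int)) (h : cur ≠ []) :
    pvAt1 (pvElem cur) = pvSum1 cur := by
  unfold pvElem
  by_cases hl : cur.length == 1
  · obtain ⟨x, rfl⟩ : ∃ x, cur = [x] := by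
      cases cur with
      | nil => simp at hl
      | cons a t => cases t with
        | nil => exact ⟨a, rfl⟩
        | cons b t' => simp at hl
    simp [pvSum1, pvAt1]
  · simp [hl, pvAt1, PySem.List.pyGet?, PySem.List.pyIdx?]

lemma pvElem_append (cur : List (List Int)) (g : List Int) (h : cur ≠ []) :
    pvElem (cur ++ [g]) = [pvAt0 g, pvAt1 g + pvSum1 cur] := by
  have h1 : ((cur ++ [g]).length == 1) = false := by
    cases cur with
    | nil => exact absurd rfl h
    | cons a t => simp
  rw [pvElem]
  simp only [h1, Bool.false_eq_true, if_false, List.getLastD_concat, pvSum1_append]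
  have : pvSum1 cur + pvAt1 g = pvAt1 g + pvSum1 cur := by omega
  rw [this]

-- Prefix of the lens accumulator factors out.
lemma pvLensGo_prefix (rest : List (List Int)) :
    ∀ (s : Int) (k : Nat) (a b : List Nat),
      pvLensGo rest s k (a ++ b) =
        (a ++ (pvLensGo rest s k b).1, (pvLensGo rest s k b).2) := by
  induction rest with
  | nil => intro s k a b; simp [pvLensGo]
  | cons r rest' ih =>
      intro s k a b
      rw [pvLensGo]
      by_cases h : s + pvAt1 r ≥ 50
      · simp only [h, if_pos]
        rw [show a ++ b ++ [k + 1] = a ++ (b ++ [k + 1]) by simp, ih]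
        conv_rhs => rw [pvLensGo]
        simp [h]
      · simp only [h, if_false]
        rw [ih]
        conv_rhs => rw [pvLensGo]
        simp [h]

-- B's computation resumed at the threshold check point with pending segment `cur`.
def pvMid (cur rest : List (List Int)) : List Nat × Int × Nat :=
  if pvSum1 cur ≥ 50 then pvLensGo rest 0 0 [cur.length]
  else pvLensGo rest (pvSum1 cur) cur.length []

-- Main invariant: B resumed at the check point on (cur, rest) computes A's continuation.
lemma pvMid_eq_pvS (rest : List (List Int)) :
    ∀ (cur : List (List Int)), cur ≠ [] →
      pvBuild (pvFin (pvMid cur rest)) (cur ++ rest) = pvS (pvElem cur) rest := by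
  induction rest with
  | nil =>
      intro cur hc
      have hk : cur.length ≠ 0 := by simpa using hc
      by_cases h : pvSum1 cur ≥ 50
      · rw [pvS]
        simp [pvMid, h, pvLensGo, pvFin, pvBuild, pvElem,
          List.take_of_length_le (le_refl cur.length)]
      · rw [pvS]
        simp [pvMid, h, pvLensGo, pvFin, hk, pvBuild, pvElem,
          List.take_of_length_le (le_refl cur.length)]
  | cons g rest' ih =>
      intro cur hc
      by_cases h : pvSum1 cur ≥ 50
      · -- segment closes: emit pvElem cur, then B restarts fresh on g :: rest'
        have hpre : pvLensGo (g :: rest') 0 0 [cur.length] =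
            ([cur.length] ++ (pvLensGo (g :: rest') 0 0 []).1, (pvLensGo (g :: rest') 0 0 []).2) := by
          simpa using pvLensGo_prefix (g :: rest') 0 0 [cur.length] []
        have hfin : pvFin (pvMid cur (g :: rest')) =
            cur.length :: pvFin (pvLensGo (g :: rest') 0 0 []) := by
          rw [pvMid, if_pos h, hpre]
          unfold pvFin
          by_cases hk : (pvLensGo (g :: rest') 0 0 []).2.2 ≠ 0 <;> simp [hk]
        have hstep : pvLensGo (g :: rest') 0 0 [] = pvMid [g] rest' := by
          rw [pvLensGo, pvMid]
          have hs : pvSum1 [g] = pvAt1 g := by simp [pvSum1]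
          rw [hs]
          by_cases hg : (50 : Int) ≤ pvAt1 g
          · simp [hg, ge_iff_le]
          · simp [hg, ge_iff_le]
        have hge : pvAt1 (pvElem cur) ≥ 50 := by rw [pvAt1_pvElem cur hc]; exact h
        have hElemg : pvElem [g] = g := by simp [pvElem, PySem.List.pyGet?, PySem.List.pyIdx?]
        have ihg := ih [g] (by simp)
        rw [List.singleton_append, hElemg] at ihg
        rw [hfin, pvBuild]
        simp only [List.take_append_of_le_length (le_refl cur.length),
          List.take_length, List.drop_append_of_le_length (le_refl cur.length),
          List.drop_length, List.nil_append]
        rw [hstep, ihg, pvS]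
        simp only [hge, if_pos]
        rw [pvElem]
      · -- segment grows: B absorbs g into the pending segment
        have hmid : pvMid cur (g :: rest') = pvMid (cur ++ [g]) rest' := by
          have hs : pvSum1 (cur ++ [g]) = pvSum1 cur + pvAt1 g := pvSum1_append cur g
          have hk : (cur ++ [g]).length = cur.length + 1 := by simp
          rw [pvMid, if_neg h, pvLensGo, pvMid, hs, hk]
          simp
        have hlist : cur ++ g :: rest' = (cur ++ [g]) ++ rest' := by simp
        rw [hmid, hlist, ih (cur ++ [g]) (by simp)]
        rw [pvS]
        have hlt : ¬ pvAt1 (pvElem cur) ≥ 50 := by rw [pvAt1_pvElem cur hc]; exact h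
        simp only [hlt, if_false]
        rw [pvElem_append cur g hc, pvAt1_pvElem cur hc]

-- ===== VERDICT (by name: the statement is the Claim_ definition above) =====
theorem r_list2_spec : Claim_equal_r_list2 := by
  intro list2 _ _
  unfold Spec_r_list2
  cases list2 with
  | nil => simp [r_list2, r_list2_alt, pvLensGo, pvFin, pvBuild]
  | cons i rest =>
      show pvAInner i rest [] = r_list2_alt (i :: rest)
      rw [pvAInner_eq_acc_pvS, List.nil_append]
      unfold r_list2_alt
      have hstep : pvLensGo (i :: rest) 0 0 [] = pvMid [i] rest := by
        rw [pvLensGo, pvMid]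
        have hs : pvSum1 [i] = pvAt1 i := by simp [pvSum1]
        rw [hs]
        by_cases hg : (50 : Int) ≤ pvAt1 i
        · simp [hg, ge_iff_le]
        · simp [hg, ge_iff_le]
      rw [hstep, show (i :: rest) = [i] ++ rest from rfl, pvMid_eq_pvS rest [i] (by simp)]
      have : pvElem [i] = i := by simp [pvElem, PySem.List.pyGet?, PySem.List.pyIdx?]
      rw [this]
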